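-- pv_equiv track=rewrite | github.com/New-Ha/Algorithm | 프로그래머스/unrated/181860. 빈 배열에 추가， 삭제하기/빈 배열에 추가， 삭제하기.py | solution
-- ===== SOURCE A (Python) =====
-- def solution(arr, flag):
--     result = [];
--     for i in range(len(arr)):
--         if flag[i]:
--             for j in range(arr[i] * 2):
--                 result.append(arr[i]);
--         else:
--             del result[-arr[i]:]
--     return result
-- ===== SOURCE B (Python) =====
-- def solution(arr, flag):
--     # Run-length stack: blocks of (value, count) instead of individual elements.
--     runs = []
--     total = 0
--     for v, f in zip(arr, flag):
--         if f:
--             k = 2 * v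
--             if k > 0:
--                 runs.append((v, k))
--                 total += k
--         else:
--             # how many elements the deletion `del result[-v:]` leaves behind
--             keep = slice(-v, None).indices(total)[0]
--             d = total - keep
--             total = keep
--             while d > 0:
--                 val, c = runs[-1]
--                 if c <= d:
--                     runs.pop()
--                     d -= c
--                 else:
--                     runs[-1] = (val, c - d)
--                     d = 0
--     out = []
--     for v, c in runs:
--         out += [v] * c
--     return out
-- ===== Notes on version B (the rewrite author's own statement) =====
-- stated objective: alternative
-- what changed: B keeps a run-length stack of (value,count) blocks, trims deletions by decrementing counts (slice.indices gives the kept length) and expands the blocks once at the end, instead of appending and deleting element by element; Pre_ excludes flag shorter than arr, where A raises IndexError.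
import Mathlib
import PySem

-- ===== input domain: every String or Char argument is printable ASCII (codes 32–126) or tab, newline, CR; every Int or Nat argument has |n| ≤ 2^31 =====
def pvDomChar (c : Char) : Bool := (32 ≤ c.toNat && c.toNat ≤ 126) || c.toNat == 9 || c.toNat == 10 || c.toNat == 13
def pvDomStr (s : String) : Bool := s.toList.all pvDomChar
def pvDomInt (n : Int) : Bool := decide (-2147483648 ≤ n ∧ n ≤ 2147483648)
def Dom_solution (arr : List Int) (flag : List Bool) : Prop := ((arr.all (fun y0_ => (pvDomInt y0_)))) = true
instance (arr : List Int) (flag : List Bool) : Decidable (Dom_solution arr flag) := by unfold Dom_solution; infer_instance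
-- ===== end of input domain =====

-- B replaces the element-by-element stack with a run-length stack of (value, count)
-- blocks, trimming deletions by decrementing counts and expanding only at the end
-- (objective: alternative — element-wise work replaced by per-operation block work).

-- ===== PORT A =====
-- one iteration of A's loop body: append arr[i] (arr[i]*2 times) or del result[-arr[i]:]
def stepA (result : List Int) (a : Int) (f : Bool) : List Int :=
  if f then (PySem.List.pyRange 0 (a * 2) 1).foldl (fun r _ => r ++ [a]) result
  else PySem.List.slice result none (some (-a))

def solution (arr : List Int) (flag : List Bool) : List Int :=
  (List.range arr.length).foldl
    (fun result i =>
      stepA result ((PySem.List.pyGet? arr (Int.ofNat i)).getD 0)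
        ((PySem.List.pyGet? flag (Int.ofNat i)).getD false))
    []

-- ===== PORT B =====
-- runs kept newest-FIRST here (Lean lists prepend); Source B keeps them newest-last.
-- Source B's `while d > 0` loop: drop d elements from the (conceptual) top of the stack
def dropRuns (d : Nat) : List (Int × Nat) → List (Int × Nat)
  | [] => []
  | (v, c) :: rest => if c ≤ d then dropRuns (d - c) rest else (v, c - d) :: rest

-- one iteration of B's loop: state = (runs, total);
-- Python's slice(-v, None).indices(total)[0] is exactly PySem.List.clampIdx total (-v)
def stepB (st : List (Int × Nat) × Nat) (a : Int) (f : Bool) : List (Int × Nat) × Nat :=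
  if f then
    let k := 2 * a
    if 0 < k then ((a, k.toNat) :: st.1, st.2 + k.toNat) else st
  else
    let keep := PySem.List.clampIdx st.2 (-a)
    (dropRuns (st.2 - keep) st.1, keep)

def solution_alt (arr : List Int) (flag : List Bool) : List Int :=
  let st := (arr.zip flag).foldl (fun st p => stepB st p.1 p.2) ([], 0)
  st.1.reverse.flatMap (fun p => List.replicate p.2 p.1)

-- ===== PRECONDITION & SPEC =====
-- A raises IndexError (flag[i]) whenever flag is shorter than arr; those inputs are excluded.
def Pre_solution (arr : List Int) (flag : List Bool) : Prop := arr.length ≤ flag.length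
instance (arr : List Int) (flag : List Bool) : Decidable (Pre_solution arr flag) := by
  unfold Pre_solution; infer_instance
def pvWitness_solution : List Int × List Bool := ([3, 2, -1, 0], [true, false, false, true])
def Spec_solution (arr : List Int) (flag : List Bool) (out : List Int) : Prop := out = solution_alt arr flag
instance (arr : List Int) (flag : List Bool) (out : List Int) : Decidable (Spec_solution arr flag out) := by unfold Spec_solution; infer_instance

-- ===== CLAIM =====
def Claim_equal_solution : Prop := ∀ (arr : List Int) (flag : List Bool),
  Dom_solution arr flag → Pre_solution arr flag → Spec_solution arr flag (solution arr flag)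

-- ===== LEMMAS AND PROOFS =====
def expand (runs : List (Int × Nat)) : List Int :=
  runs.reverse.flatMap (fun p => List.replicate p.2 p.1)

theorem expand_cons (v : Int) (c : Nat) (rs : List (Int × Nat)) :
    expand ((v, c) :: rs) = expand rs ++ List.replicate c v := by
  simp [expand]

theorem foldl_append_const {α : Type} (l : List α) (a : Int) (r : List Int) :
    l.foldl (fun r _ => r ++ [a]) r = r ++ List.replicate l.length a := by
  induction l generalizing r with
  | nil => simp
  | cons x xs ih =>
    rw [List.foldl_cons, ih, List.append_assoc]
    simp [List.replicate_succ]

theorem expand_dropRuns (d : Nat) (rs : List (Int × Nat)) :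
    expand (dropRuns d rs) = (expand rs).take ((expand rs).length - d) := by
  induction rs generalizing d with
  | nil => simp [dropRuns, expand]
  | cons p rest ih =>
    obtain ⟨v, c⟩ := p
    rw [expand_cons]
    simp only [dropRuns]
    by_cases h : c ≤ d
    · rw [if_pos h, ih]
      have hlen : (expand rest ++ List.replicate c v).length = (expand rest).length + c := by
        simp
      rw [hlen]
      have : (expand rest).length + c - d ≤ (expand rest).length := by omega
      rw [List.take_append_of_le_length this]
      congr 1
      omega
    · rw [if_neg h, expand_cons]
      have hlen : (expand rest ++ List.replicate c v).length = (expand rest).length + c := by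
        simp
      rw [hlen]
      have h1 : (expand rest).length + c - d = (expand rest).length + (c - d) := by omega
      rw [h1, List.take_append]
      simp

-- Python slice result[:b] = take (clampIdx len b)
theorem slice_to_clamp (xs : List Int) (b : Int) :
    PySem.List.slice xs none (some b) = xs.take (PySem.List.clampIdx xs.length b) := by
  simp [PySem.List.slice]

theorem clampIdx_le_self (n : Nat) (k : Int) : PySem.List.clampIdx n k ≤ n := by
  simp only [PySem.List.clampIdx]
  split_ifs <;> omega

-- step invariant: stepB simulates stepA through `expand`, keeping total = length
theorem step_sim (r : List Int) (rs : List (Int × Nat)) (a : Int) (f : Bool)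
    (hr : expand rs = r) :
    expand (stepB (rs, r.length) a f).1 = stepA r a f ∧
      (stepB (rs, r.length) a f).2 = (stepA r a f).length := by
  cases f with
  | true =>
    simp only [stepA, stepB, if_true]
    rw [foldl_append_const]
    by_cases ha : 0 < 2 * a
    · have h2a : (2 * a).toNat = (a * 2).toNat := by omega
      rw [if_pos ha, h2a, expand_cons, hr]
      constructor
      · congr 1
        congr 1
        simp [PySem.List.length_pyRange_one]
      · simp [PySem.List.length_pyRange_one]
    · rw [if_neg ha]
      have : (PySem.List.pyRange 0 (a * 2) 1).length = 0 := by
        rw [PySem.List.length_pyRange_one]; omega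
      rw [this]
      constructor
      · rw [hr]; simp
      · simp
  | false =>
    simp only [stepA, stepB, Bool.false_eq_true, if_false]
    rw [slice_to_clamp]
    have hle := clampIdx_le_self r.length (-a)
    constructor
    · rw [expand_dropRuns, hr]
      congr 1
      omega
    · rw [List.length_take]
      omega

-- main loop invariant by induction on arr generalizing flag and the accumulators
theorem loop_sim (arr : List Int) (flag : List Bool) (h : arr.length ≤ flag.length)
    (r : List Int) (rs : List (Int × Nat)) (hr : expand rs = r) :
    expand ((arr.zip flag).foldl (fun st p => stepB st p.1 p.2) (rs, r.length)).1
      = (List.range arr.length).foldl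
          (fun result i =>
            stepA result ((PySem.List.pyGet? arr (Int.ofNat i)).getD 0)
              ((PySem.List.pyGet? flag (Int.ofNat i)).getD false)) r := by
  induction arr generalizing flag r rs with
  | nil => simpa [expand] using hr
  | cons a as ih =>
    cases flag with
    | nil => simp at h
    | cons f fs =>
      have h' : as.length ≤ fs.length := by simpa using h
      obtain ⟨h1, h2⟩ := step_sim r rs a f hr
      rw [List.zip_cons_cons, List.foldl_cons, List.length_cons,
        List.range_succ_eq_map, List.foldl_cons, List.foldl_map]
      have hst : stepB (rs, r.length) a f
          = ((stepB (rs, r.length) a f).1, (stepA r a f).length) := by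
        rw [← h2]
      rw [hst]
      have hmain := ih fs h' (stepA r a f) (stepB (rs, r.length) a f).1 h1
      simp only [PySem.List.pyGet?_natCast, Int.ofNat_eq_natCast,
        List.getElem?_cons_zero, Option.getD_some, Nat.succ_eq_add_one,
        List.getElem?_cons_succ] at hmain ⊢
      exact hmain

-- ===== VERDICT =====
theorem solution_spec : Claim_equal_solution := by
  intro arr flag _ hpre
  unfold Spec_solution solution solution_alt
  have := loop_sim arr flag hpre [] [] rfl
  simp only [List.length_nil] at this
  rw [← this]
  rfl
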